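-- pv_equiv track=rewrite | github.com/muqtadirgithub/resume-screening-nlp | anonymization/anonymization.py | generalize_data
-- ===== SOURCE A (Python) =====
-- def generalize_data(text):
--     """
--     Generalizes specific companies and job titles in the input text to broader categories
--     to anonymize and abstract the data for improved privacy and fairness.
--
--     Args:
--         text (str): The input text that needs to be generalized.
--
--     Returns:
--         str: The generalized text.
--     """
--     # List of companies to generalize
--     companies = [
--         "Google", "Amazon", "Meta", "Microsoft", "Apple",
--         "Facebook", "Tesla", "Netflix", "IBM", "Oracle",
--         "Twitter", "Adobe", "Intel", "Nvidia", "Salesforce"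
--     ]
--
--     # Replace specific companies with general titles
--     for company in companies:
--         text = text.replace(company, "Tech Company")
--
--     # List of job titles to generalize
--     job_titles = [
--         "Software Engineer", "Data Scientist", "Machine Learning Engineer",
--         "Project Manager", "Data Analyst", "Business Analyst",
--         "System Architect", "Web Developer", "DevOps Engineer",
--         "Cloud Engineer", "UX/UI Designer", "Full Stack Developer",
--         "QA Engineer", "Product Manager", "Network Engineer",
--         "Database Administrator", "Security Engineer", "Automation Tester",
--         "Mobile Developer", "AI Engineer", "Software Developer"
--     ]
--
--     # Replace specific job titles with broader roles
--     for title in job_titles: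
--         text = text.replace(title, "Technical Role")
--
--     return text
-- ===== SOURCE B (Python) =====
-- COMPANIES = [
--     "Google", "Amazon", "Meta", "Microsoft", "Apple",
--     "Facebook", "Tesla", "Netflix", "IBM", "Oracle",
--     "Twitter", "Adobe", "Intel", "Nvidia", "Salesforce"
-- ]
--
-- JOB_TITLES = [
--     "Software Engineer", "Data Scientist", "Machine Learning Engineer",
--     "Project Manager", "Data Analyst", "Business Analyst",
--     "System Architect", "Web Developer", "DevOps Engineer",
--     "Cloud Engineer", "UX/UI Designer", "Full Stack Developer",
--     "QA Engineer", "Product Manager", "Network Engineer",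
--     "Database Administrator", "Security Engineer", "Automation Tester",
--     "Mobile Developer", "AI Engineer", "Software Developer"
-- ]
--
-- PAIRS = [(c, "Tech Company") for c in COMPANIES] + \
--         [(t, "Technical Role") for t in JOB_TITLES]
--
--
-- def generalize_data(text):
--     """Single left-to-right pass: at each position emit the label of the
--     first phrase that starts there, or copy the character."""
--     out = []
--     i = 0
--     n = len(text)
--     while i < n:
--         for phrase, label in PAIRS:
--             if text.startswith(phrase, i):
--                 out.append(label)
--                 i += len(phrase)
--                 break
--         else:
--             out.append(text[i])
--             i += 1
--     return "".join(out)
-- ===== Notes on version B (the rewrite author's own statement) =====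
-- stated objective: alternative
-- what changed: Instead of 36 sequential full-text replace passes, B makes one left-to-right scan over the text, emitting at each position the label of the first (phrase, label) pair that starts there; Pre_ excludes texts containing "IBMeta" or "IBMicrosoft", the only inputs where occurrences of two company names overlap and A's fixed pass order and B's leftmost scan defensibly disagree.
-- outside the precondition, e.g. on generalize_data('IBMeta'): A returns 'IBTech Company', B returns 'Tech Companyeta'; on generalize_data('IBMicrosoft'): A returns 'IBTech Company', B returns 'Tech Companyicrosoft'
import Mathlib
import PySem

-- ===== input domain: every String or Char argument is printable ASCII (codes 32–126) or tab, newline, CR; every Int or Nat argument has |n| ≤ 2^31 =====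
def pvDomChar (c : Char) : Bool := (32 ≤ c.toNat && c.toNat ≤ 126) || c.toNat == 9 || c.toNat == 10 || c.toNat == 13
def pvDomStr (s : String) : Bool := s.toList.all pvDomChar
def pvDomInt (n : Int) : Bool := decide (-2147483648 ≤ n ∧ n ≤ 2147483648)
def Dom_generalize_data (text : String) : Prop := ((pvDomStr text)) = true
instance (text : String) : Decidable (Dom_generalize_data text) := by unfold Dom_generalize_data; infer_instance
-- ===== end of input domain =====

-- B replaces A's 36 sequential full-text replace passes by ONE left-to-right scan over a
-- combined (phrase, label) table (objective: alternative; return values proved equal on Pre_).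

-- ===== PORT A =====
def companiesA : List String :=
  ["Google", "Amazon", "Meta", "Microsoft", "Apple",
   "Facebook", "Tesla", "Netflix", "IBM", "Oracle",
   "Twitter", "Adobe", "Intel", "Nvidia", "Salesforce"]

def jobTitlesA : List String :=
  ["Software Engineer", "Data Scientist", "Machine Learning Engineer",
   "Project Manager", "Data Analyst", "Business Analyst",
   "System Architect", "Web Developer", "DevOps Engineer",
   "Cloud Engineer", "UX/UI Designer", "Full Stack Developer",
   "QA Engineer", "Product Manager", "Network Engineer",
   "Database Administrator", "Security Engineer", "Automation Tester",
   "Mobile Developer", "AI Engineer", "Software Developer"]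

def generalize_data (text : String) : String :=
  jobTitlesA.foldl (fun t title => PySem.Str.replace t title "Technical Role")
    (companiesA.foldl (fun t company => PySem.Str.replace t company "Tech Company") text)

-- ===== PORT B =====
def companiesB : List String :=
  ["Google", "Amazon", "Meta", "Microsoft", "Apple",
   "Facebook", "Tesla", "Netflix", "IBM", "Oracle",
   "Twitter", "Adobe", "Intel", "Nvidia", "Salesforce"]

def jobTitlesB : List String :=
  ["Software Engineer", "Data Scientist", "Machine Learning Engineer",
   "Project Manager", "Data Analyst", "Business Analyst",
   "System Architect", "Web Developer", "DevOps Engineer",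
   "Cloud Engineer", "UX/UI Designer", "Full Stack Developer",
   "QA Engineer", "Product Manager", "Network Engineer",
   "Database Administrator", "Security Engineer", "Automation Tester",
   "Mobile Developer", "AI Engineer", "Software Developer"]

-- PAIRS = [(c, "Tech Company") for c in COMPANIES] + [(t, "Technical Role") for t in JOB_TITLES]
def pairsB : List (List Char × List Char) :=
  (companiesB.map (fun c => (c.toList, "Tech Company".toList))) ++
  (jobTitlesB.map (fun t => (t.toList, "Technical Role".toList)))

-- the while-loop of B: at each position emit the label of the first matching phrase, else copy the char
def scanB (ps : List (List Char × List Char)) (s : List Char) : List Char :=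
  match s with
  | [] => []
  | c :: t =>
    match ps.find? (fun pr => pr.1.isPrefixOf (c :: t)) with
    | some pr => pr.2 ++ scanB ps (t.drop (pr.1.length - 1))
    | none => c :: scanB ps t
termination_by s.length
decreasing_by
  · simp only [List.length_cons, List.length_drop]; omega
  · simp

def generalize_data_alt (text : String) : String :=
  String.ofList (scanB pairsB text.toList)

-- ===== PRECONDITION & SPEC =====
-- Pre_ excludes texts containing "IBMeta" or "IBMicrosoft": only there do occurrences of two
-- company names overlap, and A's fixed pass order and B's leftmost single-pass choice are both
-- defensible resolutions of the overlap (see the excluded examples in the claim).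
def Pre_generalize_data (text : String) : Prop :=
  PySem.Str.isIn "IBMeta" text = false ∧ PySem.Str.isIn "IBMicrosoft" text = false
instance (text : String) : Decidable (Pre_generalize_data text) := by
  unfold Pre_generalize_data; infer_instance

def pvWitness_generalize_data : String := "IBM hired a Data Scientist from Google"

def Spec_generalize_data (text : String) (out : String) : Prop := out = generalize_data_alt text
instance (text : String) (out : String) : Decidable (Spec_generalize_data text out) := by
  unfold Spec_generalize_data; infer_instance

-- ===== CLAIM (what is proved, stated in full; the proofs are below) =====
def Claim_equal_generalize_data : Prop :=
  ∀ (text : String), Dom_generalize_data text → Pre_generalize_data text →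
    Spec_generalize_data text (generalize_data text)

-- ===== LEMMAS AND PROOFS =====

-- proof-only abbreviations
def badL : List (List Char) := ["IBMeta".toList, "IBMicrosoft".toList]

def NoBad (s : List Char) : Prop := ∀ b ∈ badL, ¬ b <:+: s

def patsL : List (List Char) := pairsB.map (·.1)

def labelsL : List (List Char) := ["Tech Company".toList, "Technical Role".toList]

-- A's two folds, as one fold over (pattern, replacement) pairs on List Char
def applyP (ps : List (List Char × List Char)) (s : List Char) : List Char :=
  ps.foldl (fun t pr => PySem.Chars.replace t pr.1 pr.2) s

-- ---------- finite facts about the 36 phrases and 2 labels (checked by decide) ----------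

theorem fact_len : ∀ p ∈ patsL, 2 ≤ p.length := by decide

theorem fact_labels : ∀ pr ∈ pairsB, pr.2 ∈ labelsL := by decide

-- no phrase fragment overlaps a label in either direction (i = 0 included)
theorem fact_label_pat : ∀ q ∈ patsL, ∀ l ∈ labelsL, ∀ i ∈ List.range l.length,
    ¬ (l.drop i <+: q) ∧ ¬ (q <+: l.drop i) := by decide

-- no label overlaps a proper tail of a phrase in either direction
theorem fact_pat_label : ∀ q ∈ patsL, ∀ l ∈ labelsL, ∀ j ∈ List.range q.length, j ≠ 0 →
    ¬ (q.drop j <+: l) ∧ ¬ (l <+: q.drop j) := by decide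

-- order-aware overlap fact: a pattern of an EARLIER pair never starts strictly inside a later
-- pattern's match, except in the two excluded "IBM…" overlaps
theorem fact_over : ∀ k ∈ List.range pairsB.length, ∀ pr ∈ pairsB.take k,
    ∀ i ∈ List.range (pairsB[k]!.1.length), i ≠ 0 →
      ¬ (pr.1 <+: pairsB[k]!.1.drop i) ∧
      ((pairsB[k]!.1.drop i <+: pr.1) →
        pairsB[k]!.1 ++ pr.1.drop (pairsB[k]!.1.length - i) ∈ badL) := by decide

-- ---------- general list lemmas ----------

theorem prefix_append_cases {p x y : List Char} (h : p <+: x ++ y) : p <+: x ∨ x <+: p := by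
  by_cases hl : p.length ≤ x.length
  · left
    have := h.take x.length
    simpa [List.take_append, List.take_of_length_le hl] using this
  · right
    have hp := List.prefix_iff_eq_take.mp h
    have hx : p.take x.length = x := by
      rw [hp, List.take_take]
      rw [Nat.min_eq_left (by omega : x.length ≤ p.length)]
      simp
    rw [← hx]
    exact List.take_prefix _ _

theorem scanB_cons (ps : List (List Char × List Char)) (c : Char) (t : List Char) :
    scanB ps (c :: t) = match ps.find? (fun pr => pr.1.isPrefixOf (c :: t)) with
      | some pr => pr.2 ++ scanB ps (t.drop (pr.1.length - 1))
      | none => c :: scanB ps t := by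
  rw [scanB]

theorem scanB_nil_str (ps : List (List Char × List Char)) : scanB ps [] = [] := by
  rw [scanB]

-- scanB with the empty pair table is the identity
theorem scanB_nil : ∀ s, scanB [] s = s := by
  intro s
  induction s with
  | nil => simp [scanB]
  | cons c t ih => simp [scanB, ih]

-- scanB consumes a matched phrase at the front
theorem scanB_match {ps : List (List Char × List Char)} {pr : List Char × List Char}
    (rest : List Char) (hq : pr.1 ≠ [])
    (hf : ps.find? (fun x => x.1.isPrefixOf (pr.1 ++ rest)) = some pr) :
    scanB ps (pr.1 ++ rest) = pr.2 ++ scanB ps rest := by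
  cases h1 : pr.1 with
  | nil => exact absurd h1 hq
  | cons a q' =>
    rw [h1, List.cons_append] at hf
    rw [List.cons_append, scanB_cons]
    rw [hf]
    show pr.2 ++ scanB ps (List.drop (pr.1.length - 1) (q' ++ rest)) = pr.2 ++ scanB ps rest
    congr 1
    rw [h1]
    simp

-- scanB passes over a block in which no pattern can start
theorem scanB_split {ps : List (List Char × List Char)} :
    ∀ (x y : List Char), (∀ pr ∈ ps, ∀ i < x.length, ¬ pr.1 <+: (x.drop i ++ y)) →
    scanB ps (x ++ y) = x ++ scanB ps y := by
  intro x
  induction x with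
  | nil => intro y _; simp
  | cons c x' ih =>
    intro y h
    have hnone : ps.find? (fun pr => pr.1.isPrefixOf (c :: (x' ++ y))) = none := by
      rw [List.find?_eq_none]
      intro pr hpr
      simp only [List.isPrefixOf_iff_prefix]
      have := h pr hpr 0 (by simp)
      simpa using this
    rw [List.cons_append, scanB_cons, hnone]
    rw [ih y (fun pr hpr i hi => by simpa using h pr hpr (i+1) (by simpa using hi))]
    simp

-- scanning never creates a new phrase fragment at the front of its output
theorem nocreate {ps : List (List Char × List Char)}
    (hps : ∀ pr ∈ ps, pr.1 ≠ [] ∧ pr.2 ∈ labelsL) {q : List Char} (hq : q ∈ patsL) :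
    ∀ n s, s.length ≤ n → ∀ j, 0 < j → j < q.length →
      q.drop j <+: scanB ps s → q.drop j <+: s := by
  intro n
  induction n with
  | zero =>
    intro s hs j hj hjq hp
    have : s = [] := List.length_eq_zero_iff.mp (Nat.le_zero.mp hs)
    subst this
    simpa [scanB_nil_str] using hp
  | succ n ih =>
    intro s hs j hj hjq hp
    cases s with
    | nil => simpa [scanB_nil_str] using hp
    | cons c t =>
      cases hf : ps.find? (fun pr => pr.1.isPrefixOf (c :: t)) with
      | some pr =>
        exfalso
        have hmem := List.mem_of_find?_eq_some hf
        rw [scanB_cons, hf] at hp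
        have hlab := (hps pr hmem).2
        rcases prefix_append_cases hp with hc | hc
        · exact (fact_pat_label q hq pr.2 hlab j (List.mem_range.mpr hjq)
            (Nat.pos_iff_ne_zero.mp hj)).1 hc
        · exact (fact_pat_label q hq pr.2 hlab j (List.mem_range.mpr hjq)
            (Nat.pos_iff_ne_zero.mp hj)).2 hc
      | none =>
        rw [scanB_cons, hf] at hp
        cases hw : q.drop j with
        | nil =>
          exfalso
          have : q.length ≤ j := List.drop_eq_nil_iff.mp hw
          omega
        | cons a w =>
          rw [hw] at hp
          rw [List.cons_prefix_cons] at hp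
          obtain ⟨rfl, hwp⟩ := hp
          have hw' : q.drop (j+1) = w := by
            rw [List.drop_add_one_eq_tail_drop, hw]
            rfl
          rw [List.cons_prefix_cons]
          refine ⟨rfl, ?_⟩
          by_cases hend : j + 1 < q.length
          · have := ih t (by simpa using Nat.lt_succ_iff.mp (by simpa using hs)) (j+1)
              (by omega) hend (by rw [hw']; exact hwp)
            rwa [hw'] at this
          · have : w = [] := by
              have : q.drop (j+1) = [] := List.drop_eq_nil_iff.mpr (by omega)
              rw [hw'] at this
              exact this
            simp [this]

-- one more replace pass on a scanned text = scanning with the pair appended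
theorem step {ps : List (List Char × List Char)} {q r : List Char}
    (hq2 : 2 ≤ q.length) (hqpat : q ∈ patsL)
    (hps : ∀ pr ∈ ps, pr.1 ∈ patsL ∧ 2 ≤ pr.1.length ∧ pr.2 ∈ labelsL)
    (hover : ∀ pr ∈ ps, ∀ i, 0 < i → i < q.length →
      ¬ (pr.1 <+: q.drop i) ∧ ((q.drop i <+: pr.1) → q ++ pr.1.drop (q.length - i) ∈ badL)) :
    ∀ n s, s.length ≤ n → NoBad s →
      scanB [(q, r)] (scanB ps s) = scanB (ps ++ [(q, r)]) s := by
  have hqne : q ≠ [] := by intro h; rw [h] at hq2; simp at hq2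
  have hps' : ∀ pr ∈ ps, pr.1 ≠ [] ∧ pr.2 ∈ labelsL := by
    intro pr h
    refine ⟨?_, (hps pr h).2.2⟩
    intro he
    have := (hps pr h).2.1
    rw [he] at this
    simp at this
  intro n
  induction n with
  | zero =>
    intro s hs _
    have : s = [] := List.length_eq_zero_iff.mp (Nat.le_zero.mp hs)
    subst this
    simp [scanB_nil_str]
  | succ n ih =>
    intro s hs hnb
    cases s with
    | nil => simp [scanB_nil_str]
    | cons c t =>
      have hnbt : NoBad t := fun b hb hinf => hnb b hb (hinf.trans (List.suffix_cons c t).isInfix)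
      cases hf : ps.find? (fun pr => pr.1.isPrefixOf (c :: t)) with
      | some pr =>
        have hmem := List.mem_of_find?_eq_some hf
        have hpre : pr.1 <+: c :: t := by
          have := List.find?_some hf
          rwa [List.isPrefixOf_iff_prefix] at this
        obtain ⟨rest, hrest⟩ := hpre
        have hprne : pr.1 ≠ [] := (hps' pr hmem).1
        have e1 : scanB ps (c :: t) = pr.2 ++ scanB ps rest := by
          rw [← hrest]
          exact scanB_match rest hprne (by rw [hrest]; exact hf)
        have hf2 : (ps ++ [(q, r)]).find? (fun pr => pr.1.isPrefixOf (c :: t)) = some pr := by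
          rw [List.find?_append, hf]
          rfl
        have e2 : scanB (ps ++ [(q, r)]) (c :: t) = pr.2 ++ scanB (ps ++ [(q, r)]) rest := by
          rw [← hrest]
          exact scanB_match rest hprne (by rw [hrest]; exact hf2)
        have e3 : scanB [(q, r)] (pr.2 ++ scanB ps rest)
            = pr.2 ++ scanB [(q, r)] (scanB ps rest) := by
          apply scanB_split
          intro pr' hpr' i hi hcon
          have hpr'' : pr' = (q, r) := by simpa using hpr'
          subst hpr''
          rcases prefix_append_cases hcon with h | h
          · exact (fact_label_pat q hqpat pr.2 (hps pr hmem).2.2 i (List.mem_range.mpr hi)).2 h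
          · exact (fact_label_pat q hqpat pr.2 (hps pr hmem).2.2 i (List.mem_range.mpr hi)).1 h
        have hlr : rest.length ≤ n := by
          have := congrArg List.length hrest
          simp at this
          have h2 := (hps pr hmem).2.1
          simp at hs
          omega
        have hnbr : NoBad rest := fun b hb hinf =>
          hnb b hb (hinf.trans (List.IsSuffix.isInfix ⟨pr.1, hrest⟩))
        rw [e1, e2, e3, ih rest hlr hnbr]
      | none =>
        by_cases hqp : q <+: c :: t
        · obtain ⟨rest, hrest⟩ := hqp
          have hlr : rest.length ≤ n := by
            have := congrArg List.length hrest
            simp at this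
            simp at hs
            omega
          have hnbr : NoBad rest := fun b hb hinf =>
            hnb b hb (hinf.trans (List.IsSuffix.isInfix ⟨q, hrest⟩))
          have e1 : scanB ps (c :: t) = q ++ scanB ps rest := by
            rw [← hrest]
            apply scanB_split
            intro pr hpr i hi hcon
            rcases Nat.eq_zero_or_pos i with rfl | hip
            · have hnone := List.find?_eq_none.mp hf pr hpr
              simp only [List.isPrefixOf_iff_prefix] at hnone
              apply hnone
              rw [← hrest]
              simpa using hcon
            · rcases prefix_append_cases hcon with h | h
              · exact (hover pr hpr i hip (by simpa using hi)).1 h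
              · have hbad := (hover pr hpr i hip (by simpa using hi)).2 h
                obtain ⟨u, hu⟩ := h
                rw [← hu] at hcon
                have hur : u <+: rest := (List.prefix_append_right_inj _).mp hcon
                have hin : q ++ u <+: c :: t := by
                  rw [← hrest]
                  obtain ⟨w, hw⟩ := hur
                  exact ⟨w, by rw [List.append_assoc, hw]⟩
                have hu2 : pr.1.drop (q.length - i) = u := by
                  rw [← hu]
                  rw [show q.length - i = (q.drop i).length by simp, List.drop_left]
                exact hnb _ (by rw [← hu2]; exact hbad) hin.isInfix
          have hf2 : (ps ++ [(q, r)]).find? (fun pr => pr.1.isPrefixOf (c :: t)) = some (q, r) := by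
            have hb : q.isPrefixOf (c :: t) = true := by
              rw [List.isPrefixOf_iff_prefix]
              exact ⟨rest, hrest⟩
            rw [List.find?_append, hf]
            simp [List.find?, hb]
          have e2 : scanB (ps ++ [(q, r)]) (c :: t) = r ++ scanB (ps ++ [(q, r)]) rest := by
            rw [← hrest]
            exact scanB_match (pr := (q, r)) rest hqne (by rw [hrest]; exact hf2)
          have e3 : scanB [(q, r)] (q ++ scanB ps rest)
              = r ++ scanB [(q, r)] (scanB ps rest) := by
            refine scanB_match (pr := (q, r)) _ hqne ?_
            have hb : q.isPrefixOf (q ++ scanB ps rest) = true := by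
              rw [List.isPrefixOf_iff_prefix]
              exact List.prefix_append _ _
            simp [List.find?, hb]
          rw [e1, e3, e2, ih rest hlr hnbr]
        · have hf2 : (ps ++ [(q, r)]).find? (fun pr => pr.1.isPrefixOf (c :: t)) = none := by
            have hb : q.isPrefixOf (c :: t) = false := by
              rw [Bool.eq_false_iff]
              intro hcon
              rw [List.isPrefixOf_iff_prefix] at hcon
              exact hqp hcon
            rw [List.find?_append, hf]
            simp [List.find?, hb]
          have hnc : ([(q, r)] : List (List Char × List Char)).find?
              (fun pr => pr.1.isPrefixOf (c :: scanB ps t)) = none := by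
            have hb : q.isPrefixOf (c :: scanB ps t) = false := by
              rw [Bool.eq_false_iff]
              intro hcon'
              rw [List.isPrefixOf_iff_prefix] at hcon'
              revert hcon'
              show ¬ _
              intro hcon
              cases hq0 : q with
            | nil => exact hqne hq0
            | cons a q1 =>
              rw [hq0, List.cons_prefix_cons] at hcon
              obtain ⟨rfl, h1⟩ := hcon
              have hd1 : q.drop 1 = q1 := by rw [hq0]; rfl
              have := nocreate hps' hqpat t.length t le_rfl 1 (by omega) (by omega)
                (by rw [hd1]; exact h1)
              rw [hd1] at this
              apply hqp
              rw [hq0, List.cons_prefix_cons]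
              exact ⟨rfl, this⟩
            simp [List.find?, hb]
          rw [scanB_cons (ps ++ [(q, r)]), hf2, scanB_cons ps, hf, scanB_cons [(q, r)], hnc,
            ih t (by simpa using Nat.lt_succ_iff.mp (by simpa using hs)) hnbt]

-- Chars.replace IS the single-pattern scan
theorem replace_eq_scan_single (q r : List Char) (hq : q ≠ []) :
    ∀ s, PySem.Chars.replace s q r = scanB [(q, r)] s := by
  have go_eq : ∀ fuel s acc, s.length ≤ fuel →
      PySem.Chars.replace.go q r fuel s acc = acc.reverse ++ scanB [(q, r)] s := by
    intro fuel
    induction fuel with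
    | zero =>
      intro s acc hs
      have : s = [] := List.length_eq_zero_iff.mp (Nat.le_zero.mp hs)
      subst this
      simp [PySem.Chars.replace.go, scanB_nil_str]
    | succ n ihf =>
      intro s acc hs
      cases s with
      | nil => simp [PySem.Chars.replace.go, scanB_nil_str]
      | cons c t =>
        rw [PySem.Chars.replace.go]
        by_cases hp : q.isPrefixOf (c :: t) = true
        · rw [if_pos hp]
          have hlen : (List.drop q.length (c :: t)).length ≤ n := by
            simp only [List.length_drop, List.length_cons]
            have : 1 ≤ q.length := by
              cases q with
              | nil => exact absurd rfl hq
              | cons a b => simp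
            simp only [List.length_cons] at hs
            omega
          rw [ihf _ _ hlen, scanB_cons]
          have hfind : ([(q, r)] : List (List Char × List Char)).find?
              (fun pr => pr.1.isPrefixOf (c :: t)) = some (q, r) := by
            simp [List.find?, hp]
          rw [hfind]
          have hdrop : List.drop q.length (c :: t) = List.drop (q.length - 1) t := by
            cases hq0 : q with
            | nil => exact absurd hq0 hq
            | cons a b => simp
          rw [hdrop]
          simp
        · rw [if_neg hp]
          have hlen : t.length ≤ n := by
            simp only [List.length_cons] at hs
            omega
          rw [ihf _ _ hlen, scanB_cons]
          have hfind : ([(q, r)] : List (List Char × List Char)).find?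
              (fun pr => pr.1.isPrefixOf (c :: t)) = none := by
            simp [List.find?, Bool.eq_false_iff.mpr hp]
          rw [hfind]
          simp
  intro s
  rw [PySem.Chars.replace]
  rw [if_neg (by simp [List.isEmpty_iff, hq])]
  simpa using go_eq s.length s [] le_rfl

theorem passes_eq_scan : ∀ k s, NoBad s →
    applyP (pairsB.take k) s = scanB (pairsB.take k) s := by
  intro k
  induction k with
  | zero => intro s _; simp [applyP, scanB_nil]
  | succ k ihk =>
    intro s hnb
    by_cases hk : k < pairsB.length
    · rw [List.take_succ_eq_append_getElem hk]
      have hmemk : pairsB[k] ∈ pairsB := List.getElem_mem hk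
      have happ : applyP (pairsB.take k ++ [pairsB[k]]) s
          = PySem.Chars.replace (applyP (pairsB.take k) s) pairsB[k].1 pairsB[k].2 := by
        simp only [applyP, List.foldl_append, List.foldl_cons, List.foldl_nil]
      have hqpat : pairsB[k].1 ∈ patsL := List.mem_map_of_mem hmemk
      have hq2 : 2 ≤ pairsB[k].1.length := fact_len _ hqpat
      have hqne : pairsB[k].1 ≠ [] := by
        intro h
        rw [h] at hq2
        simp at hq2
      have hps : ∀ pr ∈ pairsB.take k, pr.1 ∈ patsL ∧ 2 ≤ pr.1.length ∧ pr.2 ∈ labelsL := by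
        intro pr h
        have hm : pr ∈ pairsB := List.mem_of_mem_take h
        have hp : pr.1 ∈ patsL := List.mem_map_of_mem hm
        exact ⟨hp, fact_len _ hp, fact_labels _ hm⟩
      have hbang : pairsB[k]! = pairsB[k] := getElem!_pos pairsB k hk
      have hover : ∀ pr ∈ pairsB.take k, ∀ i, 0 < i → i < pairsB[k].1.length →
          ¬ (pr.1 <+: pairsB[k].1.drop i) ∧
          ((pairsB[k].1.drop i <+: pr.1) →
            pairsB[k].1 ++ pr.1.drop (pairsB[k].1.length - i) ∈ badL) := by
        intro pr hpr i hip hi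
        have := fact_over k (List.mem_range.mpr hk) pr hpr i
          (by rw [hbang]; exact List.mem_range.mpr hi) (by omega)
        rw [hbang] at this
        exact this
      rw [happ, ihk s hnb, replace_eq_scan_single _ _ hqne]
      exact step hq2 hqpat hps hover s.length s le_rfl hnb
    · rw [show pairsB.take (k+1) = pairsB.take k by
        rw [List.take_of_length_le (by omega), List.take_of_length_le (by omega)]]
      exact ihk s hnb

-- bridge: A's String-level fold, moved to List Char
theorem foldA_chars (cs : List String) (lbl : String) : ∀ (t : String),
    (cs.foldl (fun t c => PySem.Str.replace t c lbl) t).toList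
      = (cs.map (fun c => (c.toList, lbl.toList))).foldl
          (fun t pr => PySem.Chars.replace t pr.1 pr.2) t.toList := by
  induction cs with
  | nil => intro t; simp
  | cons c cs ih => intro t; simp [List.foldl_cons, PySem.Str.toList_replace, ih]

-- ===== VERDICT (by name: the statement is the Claim_ definition above) =====
theorem generalize_data_spec : Claim_equal_generalize_data := by
  intro text _ hpre
  unfold Spec_generalize_data
  obtain ⟨h1, h2⟩ := hpre
  have hnb : NoBad text.toList := by
    intro b hb hinf
    simp only [badL, List.mem_cons, List.not_mem_nil, or_false] at hb
    rcases hb with rfl | rfl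
    · exact absurd ((PySem.Str.isIn_iff_infix "IBMeta" text).mpr hinf) (by rw [h1]; simp)
    · exact absurd ((PySem.Str.isIn_iff_infix "IBMicrosoft" text).mpr hinf) (by rw [h2]; simp)
  have hscan := passes_eq_scan pairsB.length text.toList hnb
  rw [List.take_length] at hscan
  have hA : (generalize_data text).toList = scanB pairsB text.toList := by
    unfold generalize_data
    rw [foldA_chars, foldA_chars, ← List.foldl_append]
    exact hscan
  calc generalize_data text
      = String.ofList (generalize_data text).toList := String.ofList_toList.symm
    _ = generalize_data_alt text := by rw [hA]; rfl
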